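-- pv_equiv track=rewrite | github.com/Vishnu-3101/Cod2Doc | docgen/entrypoints.py | find_entrypoints
-- ===== SOURCE A (Python) =====
-- def find_entrypoints(graph):
--
--     # Track dependencies
--     depends_on_map = {k: set(v["depends_on"]) for k, v in graph.items()}
--
--     # Build reverse dependencies (who depends on me)
--     depended_by_map = {k: set() for k in graph}
--     for comp, deps in depends_on_map.items():
--         for dep in deps:
--             if dep in depended_by_map:
--                 depended_by_map[dep].add(comp)
--
--     # Find entrypoints:
--     # Components that depend on others, but no one depends on them
--     entrypoints = []
--     for comp, deps in depends_on_map.items():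
--         if deps and len(depended_by_map[comp]) == 0:
--             entrypoints.append(comp)
--
--     # Filter components where "main" appears in the ID
--     main_components = [comp_id for comp_id in entrypoints if "main" in comp_id.lower()]
--
--     return main_components
-- ===== SOURCE B (Python) =====
-- def find_entrypoints(graph):
--     # Brute force per candidate: no reverse-dependency index is built at all.
--     # For each component whose id contains 'main' and whose dependency list is
--     # non-empty, scan every component's dependency list directly to check that
--     # nothing depends on it.
--     return [comp for comp, v in graph.items()
--             if "main" in comp.lower()
--             and v["depends_on"]
--             and not any(comp in w["depends_on"] for w in graph.values())]
-- ===== Notes on version B (the rewrite author's own statement) =====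
-- stated objective: alternative
-- what changed: Eliminates the precomputed reverse-dependency index entirely: instead of building a map/set of incoming edges in a first pass and testing it, B filters by the 'main' name test first and then, for each surviving candidate only, performs a direct nested scan (any) over all dependency lists to check that nothing depends on it.
import Mathlib
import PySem

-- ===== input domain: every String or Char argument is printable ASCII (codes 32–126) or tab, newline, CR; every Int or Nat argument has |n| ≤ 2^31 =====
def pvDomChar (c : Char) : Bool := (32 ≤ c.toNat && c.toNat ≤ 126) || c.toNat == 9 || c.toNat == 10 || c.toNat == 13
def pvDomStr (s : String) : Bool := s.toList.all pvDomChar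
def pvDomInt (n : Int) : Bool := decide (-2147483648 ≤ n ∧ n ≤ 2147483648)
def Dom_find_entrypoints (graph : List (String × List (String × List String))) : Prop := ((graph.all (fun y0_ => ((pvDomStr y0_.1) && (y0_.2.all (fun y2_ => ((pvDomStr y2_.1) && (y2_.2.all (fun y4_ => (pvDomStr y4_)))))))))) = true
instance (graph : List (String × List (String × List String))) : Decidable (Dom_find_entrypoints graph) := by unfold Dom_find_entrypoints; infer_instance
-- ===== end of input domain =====

-- B drops A's precomputed reverse-dependency index: it filters 'main' candidates first
-- and checks each by a direct nested scan (any) over all dependency lists; objective: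
-- alternative (different algorithm, same result).

-- shared helper: v["depends_on"] on the inner dict (Python dict semantics; the
-- .getD [] default is only reached outside Pre_, where Python A raises KeyError)
def pvDepsOf (v : List (String × List String)) : List String :=
  ((PySem.Dict.ofList v).get? "depends_on").getD []

-- ===== PORT A =====
-- the 'entrypoints' accumulation loop of A (separate def only to guide elaboration)
def pvEntrypointsLoop (dm dbm : PySem.Dict String (PySem.Set String)) : List String :=
  dm.items.foldl (fun acc cd =>
    if cd.2 ≠ [] ∧ PySem.Set.len (dbm.getD cd.1 (PySem.Set.empty : PySem.Set String)) = 0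
    then acc ++ [cd.1] else acc) ([] : List String)

def find_entrypoints (graph : List (String × List (String × List String))) : List String :=
  let g := PySem.Dict.ofList graph
  -- depends_on_map = {k: set(v["depends_on"]) for k, v in graph.items()}
  let depends_on_map : PySem.Dict String (PySem.Set String) :=
    g.items.foldl (fun d kv => d.insert kv.1 (PySem.Set.ofList (pvDepsOf kv.2))) PySem.Dict.empty
  -- depended_by_map = {k: set() for k in graph}
  let depended_by_map0 : PySem.Dict String (PySem.Set String) :=
    g.items.foldl (fun d kv => d.insert kv.1 PySem.Set.empty) PySem.Dict.empty
  -- for comp, deps in depends_on_map.items(): for dep in deps: if dep in …: add comp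
  let depended_by_map : PySem.Dict String (PySem.Set String) :=
    depends_on_map.items.foldl (fun d cd =>
      cd.2.foldl (fun d dep =>
        if d.contains dep then d.modify dep PySem.Set.empty (fun s => s.add cd.1) else d) d)
      depended_by_map0
  -- entrypoints loop
  let entrypoints : List String := pvEntrypointsLoop depends_on_map depended_by_map
  -- main_components comprehension
  entrypoints.filter (fun c => PySem.Str.isIn "main" (PySem.Str.lower c))

-- ===== PORT B =====
def find_entrypoints_alt (graph : List (String × List (String × List String))) : List String :=
  let g := PySem.Dict.ofList graph
  -- [comp for comp, v in graph.items()
  --   if "main" in comp.lower() and v["depends_on"]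
  --   and not any(comp in w["depends_on"] for w in graph.values())]
  (g.items.filter (fun kv =>
      PySem.Str.isIn "main" (PySem.Str.lower kv.1)
        && decide (pvDepsOf kv.2 ≠ [])
        && !(g.values.any (fun w => decide (kv.1 ∈ pvDepsOf w))))).map Prod.fst

-- ===== PRECONDITION & SPEC =====
-- Pre_ excludes exactly the inputs where Python A raises KeyError: a component value
-- (after Python's dict construction) lacking the "depends_on" key.
def Pre_find_entrypoints (graph : List (String × List (String × List String))) : Prop :=
  ∀ kv ∈ (PySem.Dict.ofList graph).items, "depends_on" ∈ kv.2.map Prod.fst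
instance (graph : List (String × List (String × List String))) : Decidable (Pre_find_entrypoints graph) := by unfold Pre_find_entrypoints; infer_instance

def pvWitness_find_entrypoints : (List (String × List (String × List String))) :=
  [("main_app", [("depends_on", ["lib"])]), ("lib", [("depends_on", [])])]

def Spec_find_entrypoints (graph : List (String × List (String × List String))) (out : List String) : Prop := out = find_entrypoints_alt graph
instance (graph : List (String × List (String × List String))) (out : List String) : Decidable (Spec_find_entrypoints graph out) := by unfold Spec_find_entrypoints; infer_instance

-- ===== CLAIM (what is proved, stated in full; the proofs are below) =====
def Claim_equal_find_entrypoints : Prop := ∀ (graph : List (String × List (String × List String))), Dom_find_entrypoints graph → Pre_find_entrypoints graph → Spec_find_entrypoints graph (find_entrypoints graph)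

-- ===== LEMMAS AND PROOFS =====

theorem pvSet_add_ne_nil {s : PySem.Set String} {x : String} : PySem.Set.add s x ≠ [] := by
  rw [PySem.Set.add_eq_ite]
  split_ifs with h
  · intro hnil; subst hnil; simp at h
  · simp

-- after the reverse-dependency loop, a tracked key's set is empty iff nothing in the
-- pair list points at it
theorem pvGetD_foldl_step (Q : List (String × String))
    (d : PySem.Dict String (PySem.Set String)) (x : String)
    (hx : d.contains x = true) :
    ((Q.foldl (fun d p => if d.contains p.2
        then d.modify p.2 PySem.Set.empty (fun s => s.add p.1) else d) d).getD x PySem.Set.empty = []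
      ↔ (d.getD x PySem.Set.empty = [] ∧ ∀ p ∈ Q, p.2 ≠ x)) := by
  induction Q generalizing d with
  | nil => simp
  | cons p Q ih =>
    simp only [List.foldl_cons]
    split_ifs with hc
    · have hx' : (d.modify p.2 PySem.Set.empty (fun s => s.add p.1)).contains x = true := by
        rw [PySem.Dict.contains_modify]; simp [hx]
      rw [ih _ hx', PySem.Dict.getD_modify]
      by_cases hxp : x = p.2
      · subst hxp
        constructor
        · rw [if_pos rfl]; rintro ⟨h, -⟩; exact absurd h pvSet_add_ne_nil
        · rintro ⟨-, h⟩; exact absurd rfl (h p (by simp))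
      · rw [if_neg hxp]
        simp only [List.mem_cons, forall_eq_or_imp]
        constructor
        · rintro ⟨h1, h2⟩; exact ⟨h1, fun h => hxp h.symm, h2⟩
        · rintro ⟨h1, -, h2⟩; exact ⟨h1, h2⟩
    · have hpx : p.2 ≠ x := by
        intro h; rw [h, hx] at hc; exact hc rfl
      rw [ih d hx]
      simp only [List.mem_cons, forall_eq_or_imp]
      tauto

theorem pvEntrypointsLoop_eq (dm dbm : PySem.Dict String (PySem.Set String)) :
    pvEntrypointsLoop dm dbm
      = (dm.items.filter (fun cd =>
          decide (cd.2 ≠ [] ∧ PySem.Set.len (dbm.getD cd.1 (PySem.Set.empty : PySem.Set String)) = 0))).map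
          (fun cd => cd.1) := by
  have h := PySem.List.foldl_append_if (fun cd : String × PySem.Set String =>
      decide (cd.2 ≠ [] ∧ PySem.Set.len (dbm.getD cd.1 (PySem.Set.empty : PySem.Set String)) = 0))
    (fun cd => cd.1) dm.items ([] : List String)
  unfold pvEntrypointsLoop
  simpa using h

theorem pvSet_ofList_eq_nil_iff (xs : List String) :
    PySem.Set.ofList xs = [] ↔ xs = [] := by
  cases xs with
  | nil => simp [PySem.Set.ofList_nil]
  | cons x xs => simp [PySem.Set.ofList_cons]

-- ===== VERDICT (by name: the statement is the Claim_ definition above) =====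
theorem find_entrypoints_spec : Claim_equal_find_entrypoints := by
  intro graph _ _
  show find_entrypoints graph = find_entrypoints_alt graph
  unfold find_entrypoints find_entrypoints_alt
  set g := PySem.Dict.ofList graph with hg
  set L := g.items with hL
  have hnodup : (L.map Prod.fst).Nodup := by
    have := PySem.Dict.nodup_keys_ofList graph
    simpa [PySem.Dict.keys, hL, hg] using this
  -- the two comprehension dicts are fresh-key folds over L
  have hdm : (L.foldl (fun d kv => d.insert kv.1 (PySem.Set.ofList (pvDepsOf kv.2)))
      PySem.Dict.empty).items = L.map (fun kv => (kv.1, PySem.Set.ofList (pvDepsOf kv.2))) := by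
    rw [PySem.Dict.items_foldl_insert_fresh L Prod.fst _ PySem.Dict.empty
      (fun a _ => PySem.Dict.contains_empty a.1) hnodup]
    rfl
  have hd0 : (L.foldl (fun d kv => d.insert kv.1 PySem.Set.empty)
      PySem.Dict.empty).items = L.map (fun kv => (kv.1, (PySem.Set.empty : PySem.Set String))) := by
    rw [PySem.Dict.items_foldl_insert_fresh L Prod.fst _ PySem.Dict.empty
      (fun a _ => PySem.Dict.contains_empty a.1) hnodup]
    rfl
  dsimp only
  rw [← hL, pvEntrypointsLoop_eq, hdm]
  -- name the pieces
  set P : List (String × PySem.Set String) :=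
    L.map (fun kv => (kv.1, PySem.Set.ofList (pvDepsOf kv.2))) with hP
  set d0 : PySem.Dict String (PySem.Set String) :=
    L.foldl (fun d kv => d.insert kv.1 PySem.Set.empty) PySem.Dict.empty with hd0def
  set dbm : PySem.Dict String (PySem.Set String) :=
    P.foldl (fun d cd =>
      cd.2.foldl (fun d dep =>
        if d.contains dep then d.modify dep PySem.Set.empty (fun s => s.add cd.1) else d) d) d0 with hdbm
  rw [show (g.values) = L.map (fun kv => kv.2) from rfl]
  -- flatten the nested reverse-dependency loop into one fold over (comp, dep) pairs
  set Q : List (String × String) := P.flatMap (fun cd => cd.2.map (fun dep => (cd.1, dep))) with hQ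
  have hflat : dbm = Q.foldl
      (fun d p => if d.contains p.2 then d.modify p.2 PySem.Set.empty (fun s => s.add p.1) else d) d0 := by
    rw [hdbm, hQ, List.foldl_flatMap]
    simp only [List.foldl_map]
  -- left side: one filtered map over L
  rw [hP, List.filter_map, List.filter_filter, List.filter_map, List.map_map]
  rw [show ((fun cd : String × PySem.Set String => cd.1) ∘
      (fun kv : String × List (String × List String) => (kv.1, PySem.Set.ofList (pvDepsOf kv.2))))
      = (Prod.fst : String × List (String × List String) → String) from rfl]
  refine congrArg _ (List.filter_congr ?_)
  intro kv hkv
  -- facts about kv.1 in the initial reverse map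
  have hmem0 : (kv.1, (PySem.Set.empty : PySem.Set String)) ∈ d0.items := by
    rw [hd0]; exact List.mem_map.mpr ⟨kv, hkv, rfl⟩
  have hkeys0 : d0.keys = L.map Prod.fst := by
    simp only [PySem.Dict.keys, hd0, List.map_map]; rfl
  have hnodup0 : d0.keys.Nodup := by rw [hkeys0]; exact hnodup
  have hcont0 : d0.contains kv.1 = true := by
    rw [PySem.Dict.contains_iff_mem_keys, hkeys0]
    exact List.mem_map.mpr ⟨kv, hkv, rfl⟩
  have hgetd0 : d0.getD kv.1 PySem.Set.empty = [] :=
    PySem.Dict.getD_of_mem_items d0 hmem0 hnodup0 PySem.Set.empty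
  -- A's emptiness test on kv.1's incoming-edge set ↔ nothing depends on kv.1
  have hA : (dbm.getD kv.1 PySem.Set.empty = []) ↔ ∀ kv' ∈ L, kv.1 ∉ pvDepsOf kv'.2 := by
    rw [hflat, pvGetD_foldl_step Q d0 kv.1 hcont0, hgetd0]
    simp only [true_and, hQ, hP, List.mem_flatMap, List.mem_map]
    constructor
    · intro h kv' hkv' hin
      exact absurd rfl (h (kv'.1, kv.1) ⟨(kv'.1, PySem.Set.ofList (pvDepsOf kv'.2)),
        ⟨kv', hkv', rfl⟩, kv.1, (PySem.Set.mem_ofList _ _).mpr hin, rfl⟩)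
    · rintro h p ⟨cd, ⟨kv', hkv', rfl⟩, dep, hdep', rfl⟩ hx
      exact h kv' hkv' (hx ▸ (PySem.Set.mem_ofList _ _).mp hdep')
  -- B's nested scan on kv.1
  have hB : ((L.map (fun kv => kv.2)).any (fun w => decide (kv.1 ∈ pvDepsOf w))) = true
      ↔ ∃ kv' ∈ L, kv.1 ∈ pvDepsOf kv'.2 := by
    simp only [List.any_eq_true, List.mem_map, decide_eq_true_eq]
    constructor
    · rintro ⟨w, ⟨kv', hkv', rfl⟩, h⟩; exact ⟨kv', hkv', h⟩
    · rintro ⟨kv', hkv', h⟩; exact ⟨kv'.2, ⟨kv', hkv', rfl⟩, h⟩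
  have hlen : ((dbm.getD kv.1 PySem.Set.empty).len = 0) ↔ dbm.getD kv.1 PySem.Set.empty = [] := by
    simp [PySem.Set.len, List.length_eq_zero_iff]
  have h1a : decide (PySem.Set.ofList (pvDepsOf kv.2) ≠ []) = decide (pvDepsOf kv.2 ≠ []) :=
    decide_eq_decide.mpr (not_congr (pvSet_ofList_eq_nil_iff _))
  have h1b : decide ((dbm.getD kv.1 PySem.Set.empty).len = 0)
      = !((L.map (fun kv => kv.2)).any (fun w => decide (kv.1 ∈ pvDepsOf w))) := by
    by_cases hm : ∃ kv' ∈ L, kv.1 ∈ pvDepsOf kv'.2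
    · rw [hB.mpr hm, Bool.not_true]
      refine decide_eq_false (fun h => ?_)
      obtain ⟨kv', hkv', hv⟩ := hm
      exact (hA.mp (hlen.mp h)) kv' hkv' hv
    · have : (L.map (fun kv => kv.2)).any (fun w => decide (kv.1 ∈ pvDepsOf w)) = false := by
        rcases h : (L.map (fun kv => kv.2)).any (fun w => decide (kv.1 ∈ pvDepsOf w)) with _|_
        · exact h
        · exact absurd (hB.mp h) hm
      rw [this, Bool.not_false]
      exact decide_eq_true (hlen.mpr (hA.mpr (fun kv' hkv' hv => hm ⟨kv', hkv', hv⟩)))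
  simp only [Function.comp_apply]
  rw [Bool.decide_and, h1a, h1b]
  cases PySem.Str.isIn "main" (PySem.Str.lower kv.1) <;>
    cases decide (pvDepsOf kv.2 ≠ []) <;>
    cases (L.map (fun kv => kv.2)).any (fun w => decide (kv.1 ∈ pvDepsOf w)) <;> rfl
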